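-- pv_equiv track=rewrite | github.com/aLexzzz430/Cognitive-OS | core/orchestration/state_abstraction.py | _pairwise_component_stats
-- ===== SOURCE A (Python) =====
-- from typing import Any, Dict, List, Optional, Sequence, Tuple
--
-- def _pairwise_component_stats(
--     components: Sequence[Dict[str, Any]],
--  ) -> Tuple[int, int, int, int]:
--     row_overlap_pairs = 0
--     col_overlap_pairs = 0
--     strict_row_order_pairs = 0
--     strict_col_order_pairs = 0
--     for idx, left in enumerate(components):
--         left_bbox = left.get("bbox", (0, 0, 0, 0))
--         left_row_start, left_row_end = left_bbox[0], left_bbox[1]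
--         left_col_start, left_col_end = left_bbox[2], left_bbox[3]
--         for right in components[idx + 1 :]:
--             right_bbox = right.get("bbox", (0, 0, 0, 0))
--             right_row_start, right_row_end = right_bbox[0], right_bbox[1]
--             right_col_start, right_col_end = right_bbox[2], right_bbox[3]
--             if max(left_row_start, right_row_start) <= min(left_row_end, right_row_end):
--                 row_overlap_pairs += 1
--             if max(left_col_start, right_col_start) <= min(left_col_end, right_col_end):
--                 col_overlap_pairs += 1
--             if left_row_end < right_row_start:
--                 strict_row_order_pairs += 1
--             if left_col_end < right_col_start:
--                 strict_col_order_pairs += 1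
--     return (
--         row_overlap_pairs,
--         col_overlap_pairs,
--         strict_row_order_pairs,
--         strict_col_order_pairs,
--     )
-- ===== SOURCE B (Python) =====
-- def _cross_lt(ends, starts):
--     # both lists sorted ascending; number of pairs (e, s) with e < s
--     total = 0
--     k = 0
--     n = len(ends)
--     for s in starts:
--         while k < n and ends[k] < s:
--             k += 1
--         total += k
--     return total
--
--
-- def _strict_pairs(iv):
--     # count index pairs i < j with end_i < start_j, by divide and conquer:
--     # cross pairs between halves are counted with one sorted two-pointer merge
--     if len(iv) < 2:
--         return 0
--     mid = len(iv) // 2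
--     left, right = iv[:mid], iv[mid:]
--     cross = _cross_lt(sorted(e for _, e in left), sorted(s for s, _ in right))
--     return _strict_pairs(left) + _strict_pairs(right) + cross
--
--
-- def _overlap_pairs(iv):
--     # overlapping pairs = all pairs of non-degenerate intervals minus the
--     # disjoint ones; disjoint ordered pairs are counted by a sorted merge
--     valid = [(s, e) for s, e in iv if s <= e]
--     m = len(valid)
--     x = _cross_lt(sorted(e for _, e in valid), sorted(s for s, _ in valid))
--     return m * (m - 1) // 2 - x
--
--
-- def _pairwise_component_stats(components):
--     boxes = [c.get("bbox", (0, 0, 0, 0)) for c in components]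
--     rows = [(b[0], b[1]) for b in boxes]
--     cols = [(b[2], b[3]) for b in boxes]
--     return (
--         _overlap_pairs(rows),
--         _overlap_pairs(cols),
--         _strict_pairs(rows),
--         _strict_pairs(cols),
--     )
-- ===== Notes on version B (the rewrite author's own statement) =====
-- stated objective: faster
-- what changed: B replaces the all-pairs double loop by sorting-based counting: overlaps per axis come from a closed form m*(m-1)//2 minus disjoint ordered pairs counted by a two-pointer merge of sorted endpoints, and strict index-ordered precedences are counted by divide-and-conquer with a sorted cross-merge per level.
import Mathlib
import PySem

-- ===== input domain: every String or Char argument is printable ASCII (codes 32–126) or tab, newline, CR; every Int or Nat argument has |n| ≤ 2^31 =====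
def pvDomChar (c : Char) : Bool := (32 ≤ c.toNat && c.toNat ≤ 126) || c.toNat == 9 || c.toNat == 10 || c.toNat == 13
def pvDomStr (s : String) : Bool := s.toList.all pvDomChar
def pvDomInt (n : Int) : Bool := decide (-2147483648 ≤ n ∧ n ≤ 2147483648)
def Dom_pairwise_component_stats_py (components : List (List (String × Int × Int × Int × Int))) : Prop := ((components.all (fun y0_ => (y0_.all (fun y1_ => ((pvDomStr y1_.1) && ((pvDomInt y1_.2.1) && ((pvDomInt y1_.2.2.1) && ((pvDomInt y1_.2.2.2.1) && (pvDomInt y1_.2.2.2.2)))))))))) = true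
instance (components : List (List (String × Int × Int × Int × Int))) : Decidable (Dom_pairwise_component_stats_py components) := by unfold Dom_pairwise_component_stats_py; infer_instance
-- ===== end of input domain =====

-- B replaces the all-pairs double loop by sorting-based counting (closed form + sorted
-- two-pointer merges, divide and conquer for the index-ordered counts) — asymptotically faster.

-- ===== PORT A =====
-- left.get("bbox", (0, 0, 0, 0))
def bboxA (c : List (String × Int × Int × Int × Int)) : Int × Int × Int × Int :=
  PySem.Dict.getD (PySem.Dict.mk c) "bbox" (0, 0, 0, 0)

-- inner loop: for right in components[idx+1:] — updates the four counters
def pyInnerA (l : Int × Int × Int × Int) (rest : List (List (String × Int × Int × Int × Int)))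
    (acc : Int × Int × Int × Int) : Int × Int × Int × Int :=
  rest.foldl (fun acc right =>
    let r := bboxA right
    (acc.1 + (if max l.1 r.1 ≤ min l.2.1 r.2.1 then 1 else 0),
     acc.2.1 + (if max l.2.2.1 r.2.2.1 ≤ min l.2.2.2 r.2.2.2 then 1 else 0),
     acc.2.2.1 + (if l.2.1 < r.1 then 1 else 0),
     acc.2.2.2 + (if l.2.2.2 < r.2.2.1 then 1 else 0))) acc

-- outer loop: for idx, left in enumerate(components); components[idx+1:] is the tail
def pyOuterA : List (List (String × Int × Int × Int × Int)) → (Int × Int × Int × Int) → Int × Int × Int × Int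
  | [], acc => acc
  | left :: rest, acc => pyOuterA rest (pyInnerA (bboxA left) rest acc)

def pairwise_component_stats_py (components : List (List (String × Int × Int × Int × Int))) : Int × Int × Int × Int :=
  pyOuterA components (0, 0, 0, 0)

-- ===== PORT B =====
-- c.get("bbox", (0, 0, 0, 0)) (B's own extraction pass)
def bboxB (c : List (String × Int × Int × Int × Int)) : Int × Int × Int × Int :=
  PySem.Dict.getD (PySem.Dict.mk c) "bbox" (0, 0, 0, 0)

-- the 'while k < n and ends[k] < s: k += 1' step: the remaining suffix of ends plays ends[k:], k is the counter
def skipLt (s : Int) : List Int → Int → List Int × Int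
  | [], k => ([], k)
  | e :: es, k => if e < s then skipLt s es (k + 1) else (e :: es, k)

-- the 'for s in starts' loop of _cross_lt with state (remaining ends, k, total)
def crossLtLoop : List Int → List Int → Int → Int → Int
  | _, [], _, total => total
  | ends, s :: ss, k, total =>
      let p := skipLt s ends k
      crossLtLoop p.1 ss p.2 (total + p.2)

def crossLt (ends starts : List Int) : Int := crossLtLoop ends starts 0 0

-- _strict_pairs: divide and conquer, cross pairs via a sorted merge
def strictPairsB (iv : List (Int × Int)) : Int :=
  if h : iv.length < 2 then 0
  else
    let mid := iv.length / 2
    let L := iv.take mid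
    let R := iv.drop mid
    strictPairsB L + strictPairsB R +
      crossLt (PySem.List.sorted (L.map Prod.snd) (fun x => x) false)
              (PySem.List.sorted (R.map Prod.fst) (fun x => x) false)
  termination_by iv.length
  decreasing_by
  · simp only [List.length_take]; omega
  · simp only [List.length_drop]; omega

-- _overlap_pairs: closed form minus disjoint ordered pairs
def overlapPairsB (iv : List (Int × Int)) : Int :=
  let valid := iv.filter (fun p => p.1 ≤ p.2)
  let m : Int := valid.length
  let x := crossLt (PySem.List.sorted (valid.map Prod.snd) (fun x => x) false)
                   (PySem.List.sorted (valid.map Prod.fst) (fun x => x) false)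
  PySem.Int.floordiv (m * (m - 1)) 2 - x

def pairwise_component_stats_py_alt (components : List (List (String × Int × Int × Int × Int))) : Int × Int × Int × Int :=
  let boxes := components.map bboxB
  let rows := boxes.map (fun b => (b.1, b.2.1))
  let cols := boxes.map (fun b => (b.2.2.1, b.2.2.2))
  (overlapPairsB rows, overlapPairsB cols, strictPairsB rows, strictPairsB cols)

-- ===== PRECONDITION & SPEC =====
def Spec_pairwise_component_stats_py (components : List (List (String × Int × Int × Int × Int))) (out : Int × Int × Int × Int) : Prop := out = pairwise_component_stats_py_alt components
instance (components : List (List (String × Int × Int × Int × Int))) (out : Int × Int × Int × Int) : Decidable (Spec_pairwise_component_stats_py components out) := by unfold Spec_pairwise_component_stats_py; infer_instance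

-- ===== CLAIM (what is proved, stated in full; the proofs are below) =====
def Claim_equal_pairwise_component_stats_py : Prop := ∀ (components : List (List (String × Int × Int × Int × Int))), Dom_pairwise_component_stats_py components → Spec_pairwise_component_stats_py components (pairwise_component_stats_py components)

-- ===== LEMMAS AND PROOFS =====

-- canonical count over ordered pairs i < j
def pairCount {α : Type} (p : α → α → Bool) : List α → Int
  | [] => 0
  | x :: xs => ((xs.countP (p x) : Int)) + pairCount p xs

lemma sum_map_addf {α : Type} (f g : α → Int) (l : List α) :
    (l.map (fun z => f z + g z)).sum = (l.map f).sum + (l.map g).sum := by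
  induction l with
  | nil => simp
  | cons z zs ih => simp only [List.map_cons, List.sum_cons, ih]; ring

lemma sum_map_ite_one {α : Type} (p : α → Bool) (l : List α) :
    (l.map (fun z => if p z then (1 : Int) else 0)).sum = (l.countP p : Int) := by
  induction l with
  | nil => simp
  | cons z zs ih =>
      simp only [List.map_cons, List.sum_cons, List.countP_cons, ih]
      split_ifs <;> push_cast <;> ring

lemma pyInnerA_eq (l : Int × Int × Int × Int) (rest : List (List (String × Int × Int × Int × Int)))
    (a b c d : Int) :
    pyInnerA l rest (a, b, c, d) =
      (a + (rest.countP (fun r => decide (max l.1 (bboxA r).1 ≤ min l.2.1 (bboxA r).2.1)) : Int),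
       b + (rest.countP (fun r => decide (max l.2.2.1 (bboxA r).2.2.1 ≤ min l.2.2.2 (bboxA r).2.2.2)) : Int),
       c + (rest.countP (fun r => decide (l.2.1 < (bboxA r).1)) : Int),
       d + (rest.countP (fun r => decide (l.2.2.2 < (bboxA r).2.2.1)) : Int)) := by
  induction rest generalizing a b c d with
  | nil => simp [pyInnerA]
  | cons r rs ih =>
      simp only [pyInnerA, List.foldl_cons] at *
      rw [ih]
      simp only [List.countP_cons, decide_eq_true_eq, Prod.mk.injEq]
      refine ⟨?_, ?_, ?_, ?_⟩ <;> split_ifs <;> push_cast <;> ring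

lemma pyOuterA_eq (comps : List (List (String × Int × Int × Int × Int))) (a b c d : Int) :
    pyOuterA comps (a, b, c, d) =
      (a + pairCount (fun x y => decide (max (bboxA x).1 (bboxA y).1 ≤ min (bboxA x).2.1 (bboxA y).2.1)) comps,
       b + pairCount (fun x y => decide (max (bboxA x).2.2.1 (bboxA y).2.2.1 ≤ min (bboxA x).2.2.2 (bboxA y).2.2.2)) comps,
       c + pairCount (fun x y => decide ((bboxA x).2.1 < (bboxA y).1)) comps,
       d + pairCount (fun x y => decide ((bboxA x).2.2.2 < (bboxA y).2.2.1)) comps) := by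
  induction comps generalizing a b c d with
  | nil => simp [pyOuterA, pairCount]
  | cons x xs ih =>
      simp only [pyOuterA, pyInnerA_eq, ih, pairCount, Prod.mk.injEq]
      refine ⟨?_, ?_, ?_, ?_⟩ <;> ring

lemma pairCount_map {α β : Type} (p : β → β → Bool) (g : α → β) (xs : List α) :
    pairCount p (xs.map g) = pairCount (fun x y => p (g x) (g y)) xs := by
  induction xs with
  | nil => simp [pairCount]
  | cons x rest ih =>
      simp only [List.map_cons, pairCount, ih, List.countP_map]
      rfl

-- skipLt computed in closed form
lemma skipLt_eq (s : Int) (es : List Int) (k : Int) :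
    skipLt s es k = (es.dropWhile (fun e => decide (e < s)),
      k + ((es.takeWhile (fun e => decide (e < s))).length : Int)) := by
  induction es generalizing k with
  | nil => simp [skipLt]
  | cons e es ih =>
      by_cases h : e < s
      · simp [skipLt, h, List.dropWhile, List.takeWhile, ih]; ring
      · simp [skipLt, h, List.dropWhile, List.takeWhile]

-- on a sorted list, countP (< s) is the takeWhile length
lemma countP_lt_of_sorted (s : Int) (es : List Int) (hs : es.Pairwise (· ≤ ·)) :
    (es.countP (fun e => decide (e < s)) : Int) = ((es.takeWhile (fun e => decide (e < s))).length : Int) := by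
  induction es with
  | nil => simp
  | cons e es ih =>
      rcases List.pairwise_cons.mp hs with ⟨hle, htl⟩
      by_cases h : e < s
      · simp [List.countP_cons, List.takeWhile, h, ih htl]
      · have hz : es.countP (fun e => decide (e < s)) = 0 := by
          rw [List.countP_eq_zero]
          intro x hx
          have := hle x hx
          simp only [decide_eq_true_eq]
          omega
        simp [List.countP_cons, List.takeWhile, h, hz]

-- split countP at a lower threshold (s ≤ s'): takeWhile (< s) elements are all < s'
lemma countP_lt_split (s s' : Int) (hss : s ≤ s') (es : List Int) :
    (es.countP (fun e => decide (e < s')) : Int) =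
      ((es.takeWhile (fun e => decide (e < s))).length : Int) +
      ((es.dropWhile (fun e => decide (e < s))).countP (fun e => decide (e < s')) : Int) := by
  conv_lhs => rw [← List.takeWhile_append_dropWhile (p := fun e => decide (e < s)) (l := es)]
  rw [List.countP_append]
  have : (es.takeWhile (fun e => decide (e < s))).countP (fun e => decide (e < s')) =
      (es.takeWhile (fun e => decide (e < s))).length := by
    rw [List.countP_eq_length]
    intro x hx
    have := List.mem_takeWhile_imp hx
    simp only [decide_eq_true_eq] at *
    omega
  rw [this]
  push_cast
  ring

lemma crossLtLoop_eq (starts : List Int) (ends E : List Int) (k total : Int)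
    (hE : ends.Pairwise (· ≤ ·)) (hS : starts.Pairwise (· ≤ ·))
    (hk : ∀ s ∈ starts, (E.countP (fun e => decide (e < s)) : Int) = k + (ends.countP (fun e => decide (e < s)) : Int)) :
    crossLtLoop ends starts k total =
      total + (starts.map (fun s => (E.countP (fun e => decide (e < s)) : Int))).sum := by
  induction starts generalizing ends k total with
  | nil => simp [crossLtLoop]
  | cons s ss ih =>
      rcases List.pairwise_cons.mp hS with ⟨hle, hss⟩
      have hkk : k + ((ends.takeWhile (fun e => decide (e < s))).length : Int)
          = (E.countP (fun e => decide (e < s)) : Int) := by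
        rw [hk s (by simp), countP_lt_of_sorted s ends hE]
      simp only [crossLtLoop, skipLt_eq]
      rw [ih (ends.dropWhile (fun e => decide (e < s)))
            (k + ((ends.takeWhile (fun e => decide (e < s))).length : Int)) _
            (hE.sublist (List.dropWhile_sublist _)) hss ?_]
      · simp only [List.map_cons, List.sum_cons, hkk]; ring
      · intro s' hs'
        rw [hk s' (by simp [hs']), countP_lt_split s s' (hle s' hs') ends]
        ring

-- crossLt on two sorted lists counts the (e, s) pairs with e < s
lemma crossLt_eq (ends starts : List Int)
    (hE : ends.Pairwise (· ≤ ·)) (hS : starts.Pairwise (· ≤ ·)) :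
    crossLt ends starts = (starts.map (fun s => (ends.countP (fun e => decide (e < s)) : Int))).sum := by
  unfold crossLt
  rw [crossLtLoop_eq starts ends ends 0 0 hE hS (by intro s _; ring)]
  ring

-- crossLt over the sorted copies = the unsorted double count
lemma crossLt_sorted_eq (es ss : List Int) :
    crossLt (PySem.List.sorted es (fun x => x) false) (PySem.List.sorted ss (fun x => x) false) =
      (ss.map (fun s => (es.countP (fun e => decide (e < s)) : Int))).sum := by
  have hE := PySem.List.sorted_pairwise es (fun x => x)
  have hS := PySem.List.sorted_pairwise ss (fun x => x)
  rw [crossLt_eq _ _ hE hS]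
  have hpe : (PySem.List.sorted es (fun x => x) false).Perm es := PySem.List.sorted_perm es (fun x => x) false
  have hps : (PySem.List.sorted ss (fun x => x) false).Perm ss := PySem.List.sorted_perm ss (fun x => x) false
  have hmap : ∀ s : Int, ((PySem.List.sorted es (fun x => x) false).countP (fun e => decide (e < s)) : Int)
      = (es.countP (fun e => decide (e < s)) : Int) := fun s => by rw [hpe.countP_eq]
  calc ((PySem.List.sorted ss (fun x => x) false).map
          (fun s => ((PySem.List.sorted es (fun x => x) false).countP (fun e => decide (e < s)) : Int))).sum
      = ((PySem.List.sorted ss (fun x => x) false).map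
          (fun s => (es.countP (fun e => decide (e < s)) : Int))).sum := by
        congr 1; exact List.map_congr_left (fun s _ => hmap s)
    _ = (ss.map (fun s => (es.countP (fun e => decide (e < s)) : Int))).sum :=
        (hps.map _).sum_eq

-- pairCount splits over an append
lemma pairCount_append {α : Type} (q : α → α → Bool) (L R : List α) :
    pairCount q (L ++ R) = pairCount q L + pairCount q R +
      (R.map (fun y => (L.countP (fun x => q x y) : Int))).sum := by
  induction L with
  | nil => simp [pairCount]
  | cons x L ih =>
      simp only [List.cons_append, pairCount, ih, List.countP_append]
      have : (R.map (fun y => ((x :: L).countP (fun x' => q x' y) : Int))).sum =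
          (R.map (fun y => (if q x y then (1 : Int) else 0) + (L.countP (fun x' => q x' y) : Int))).sum := by
        congr 1
        apply List.map_congr_left
        intro y _
        simp only [List.countP_cons]
        split_ifs <;> push_cast <;> ring
      rw [this, sum_map_addf, sum_map_ite_one (fun y => q x y)]
      push_cast
      ring

-- the strict-precedence D&C equals the pairwise count
lemma strictPairsB_eq (iv : List (Int × Int)) :
    strictPairsB iv = pairCount (fun x y => decide (x.2 < y.1)) iv := by
  by_cases h : iv.length < 2
  · rw [strictPairsB, dif_pos h]
    match iv, h with
    | [], _ => simp [pairCount]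
    | [x], _ => simp [pairCount]
  · rw [strictPairsB, dif_neg h]
    dsimp only
    have h2 : 2 ≤ iv.length := by omega
    have hmid : 1 ≤ iv.length / 2 ∧ iv.length / 2 < iv.length := by omega
    rw [strictPairsB_eq (iv.take (iv.length / 2)), strictPairsB_eq (iv.drop (iv.length / 2))]
    rw [crossLt_sorted_eq]
    conv_rhs => rw [← List.take_append_drop (iv.length / 2) iv]
    rw [pairCount_append]
    congr 1
    have : ∀ y : Int × Int, (((iv.take (iv.length / 2)).map Prod.snd).countP (fun e => decide (e < y.1)) : Int)
        = ((iv.take (iv.length / 2)).countP (fun x => decide (x.2 < y.1)) : Int) := by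
      intro y; rw [List.countP_map]; rfl
    calc ((((iv.drop (iv.length / 2)).map Prod.fst)).map
            (fun s => (((iv.take (iv.length / 2)).map Prod.snd).countP (fun e => decide (e < s)) : Int))).sum
        = ((iv.drop (iv.length / 2)).map
            (fun y => (((iv.take (iv.length / 2)).map Prod.snd).countP (fun e => decide (e < y.1)) : Int))).sum := by
          rw [List.map_map]; rfl
      _ = ((iv.drop (iv.length / 2)).map
            (fun y => ((iv.take (iv.length / 2)).countP (fun x => decide (x.2 < y.1)) : Int))).sum := by
          congr 1; exact List.map_congr_left (fun y _ => this y)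
  termination_by iv.length
  decreasing_by
  · simp only [List.length_take]; omega
  · simp only [List.length_drop]; omega

-- degenerate intervals overlap nothing: filtering them out preserves the overlap pair count
lemma pairCount_overlap_filter (iv : List (Int × Int)) :
    pairCount (fun x y => decide (max x.1 y.1 ≤ min x.2 y.2)) iv =
      pairCount (fun x y => decide (max x.1 y.1 ≤ min x.2 y.2)) (iv.filter (fun p => decide (p.1 ≤ p.2))) := by
  induction iv with
  | nil => simp [pairCount]
  | cons x xs ih =>
      by_cases hx : x.1 ≤ x.2
      · rw [List.filter_cons_of_pos (by simpa)]
        simp only [pairCount, ih]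
        congr 2
        rw [List.countP_filter]
        apply List.countP_congr
        intro y _
        simp only [Bool.and_eq_true, decide_eq_true_eq]
        omega
      · rw [List.filter_cons_of_neg (by simpa using hx)]
        simp only [pairCount, ih]
        have : xs.countP (fun y => decide (max x.1 y.1 ≤ min x.2 y.2)) = 0 := by
          rw [List.countP_eq_zero]
          intro y _
          simp only [decide_eq_true_eq]
          omega
        rw [this]
        push_cast
        ring

-- sum over the whole list of 'earlier-than' counts = both pair orders + diagonal
lemma sum_countP_whole {α : Type} (q : α → α → Bool) (l : List α) :
    (l.map (fun y => (l.countP (fun x => q x y) : Int))).sum =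
      pairCount q l + pairCount (fun x y => q y x) l + (l.countP (fun x => q x x) : Int) := by
  induction l with
  | nil => simp [pairCount]
  | cons x xs ih =>
      have hsplit : (xs.map (fun y => ((x :: xs).countP (fun x' => q x' y) : Int))).sum =
          (xs.map (fun y => (if q x y then (1 : Int) else 0) + (xs.countP (fun x' => q x' y) : Int))).sum := by
        congr 1
        apply List.map_congr_left
        intro y _
        simp only [List.countP_cons]
        split_ifs <;> push_cast <;> ring
      simp only [List.map_cons, List.sum_cons, pairCount]
      rw [hsplit, sum_map_addf, sum_map_ite_one (fun y => q x y), ih]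
      simp only [List.countP_cons]
      split_ifs <;> push_cast <;> ring

-- three indicators summing to one ⇒ the three countPs sum to the length
lemma countP_three {α : Type} (p₁ p₂ p₃ : α → Bool) (xs : List α)
    (h : ∀ y ∈ xs, ((if p₁ y then (1 : Int) else 0) + (if p₂ y then 1 else 0) + (if p₃ y then 1 else 0)) = 1) :
    (xs.countP p₁ : Int) + (xs.countP p₂ : Int) + (xs.countP p₃ : Int) = (xs.length : Int) := by
  induction xs with
  | nil => simp
  | cons y ys ih =>
      have hy := h y (by simp)
      have hys := ih (fun z hz => h z (by simp [hz]))
      simp only [List.countP_cons, List.length_cons]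
      push_cast
      split_ifs at hy ⊢ <;> omega

lemma pairCount_trichotomy {α : Type} (ov q : α → α → Bool) (l : List α)
    (h : ∀ x ∈ l, ∀ y ∈ l,
      ((if ov x y then (1 : Int) else 0) + (if q x y then 1 else 0) + (if q y x then 1 else 0)) = 1) :
    pairCount ov l + pairCount q l + pairCount (fun x y => q y x) l =
      pairCount (fun _ _ => true) l := by
  induction l with
  | nil => simp [pairCount]
  | cons x xs ih =>
      simp only [pairCount]
      have hhead : (xs.countP (ov x) : Int) + (xs.countP (q x) : Int) + (xs.countP (fun y => q y x) : Int)
          = (xs.length : Int) :=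
        countP_three (ov x) (q x) (fun y => q y x) xs
          (fun y hy => h x (by simp) y (by simp [hy]))
      have htail := ih (fun a ha b hb => h a (by simp [ha]) b (by simp [hb]))
      have htrue : (xs.countP (fun _ => true) : Int) = (xs.length : Int) := by
        simp [List.countP_eq_length]
      rw [htrue]
      omega

lemma pairCount_true_closed (l : List (Int × Int)) :
    2 * pairCount (fun _ _ => true) l = (l.length : Int) * ((l.length : Int) - 1) := by
  induction l with
  | nil => simp [pairCount]
  | cons x xs ih =>
      simp only [pairCount, List.length_cons]
      have htrue : (xs.countP (fun _ => true) : Int) = (xs.length : Int) := by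
        simp [List.countP_eq_length]
      rw [htrue]
      push_cast
      nlinarith [ih]

-- the closed-form overlap computation equals the pairwise count
lemma overlapPairsB_eq (iv : List (Int × Int)) :
    overlapPairsB iv = pairCount (fun x y => decide (max x.1 y.1 ≤ min x.2 y.2)) iv := by
  unfold overlapPairsB
  dsimp only
  set V := iv.filter (fun p => decide (p.1 ≤ p.2)) with hV
  have hvalid : ∀ p ∈ V, p.1 ≤ p.2 := by
    intro p hp
    have := List.of_mem_filter hp
    simpa using this
  -- the cross count
  rw [crossLt_sorted_eq]
  have hx : ((V.map Prod.fst).map (fun s => ((V.map Prod.snd).countP (fun e => decide (e < s)) : Int))).sum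
      = (V.map (fun y => (V.countP (fun x => decide (x.2 < y.1)) : Int))).sum := by
    rw [List.map_map]
    congr 1
    apply List.map_congr_left
    intro y _
    simp only [Function.comp_apply, List.countP_map]
    rfl
  rw [hx, sum_countP_whole (fun x y => decide (x.2 < y.1)) V]
  have hdiag : (V.countP (fun x => decide (x.2 < x.1)) : Int) = 0 := by
    have : V.countP (fun x => decide (x.2 < x.1)) = 0 := by
      rw [List.countP_eq_zero]
      intro x hxm
      have := hvalid x hxm
      simp only [decide_eq_true_eq]
      omega
    rw [this]; rfl
  have htri := pairCount_trichotomy (fun x y => decide (max x.1 y.1 ≤ min x.2 y.2))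
      (fun x y => decide (x.2 < y.1)) V
      (by
        intro x hxm y hym
        have h1 := hvalid x hxm
        have h2 := hvalid y hym
        split_ifs <;> simp_all <;> omega)
  have hclosed := pairCount_true_closed V
  have hfd : PySem.Int.floordiv ((V.length : Int) * ((V.length : Int) - 1)) 2
      = pairCount (fun _ _ => true) V := by
    rw [PySem.Int.floordiv_eq_ediv_of_pos (by omega)]
    omega
  rw [pairCount_overlap_filter iv, ← hV, hfd]
  have hbeta : pairCount (fun x y : Int × Int => (fun x y : Int × Int => decide (x.2 < y.1)) y x) V
      = pairCount (fun x y : Int × Int => decide (y.2 < x.1)) V := rfl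
  omega

-- ===== VERDICT (by name: the statement is the Claim_ definition above) =====
theorem pairwise_component_stats_py_spec : Claim_equal_pairwise_component_stats_py := by
  intro comps _
  show pairwise_component_stats_py comps = pairwise_component_stats_py_alt comps
  simp only [pairwise_component_stats_py, pairwise_component_stats_py_alt, pyOuterA_eq,
    overlapPairsB_eq, strictPairsB_eq, List.map_map, pairCount_map]
  simp only [bboxA, bboxB, Function.comp, Prod.mk.injEq, zero_add]
  exact ⟨rfl, rfl, rfl, rfl⟩
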